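-- pv_equiv track=rewrite | github.com/skn8733/Recursive-Sequence-Indexing | sequence_solution.py | naive_get_char
-- ===== SOURCE A (Python) =====
-- def naive_get_char(n):
--     seq = "0"
--     for _ in range(32):
--         if len(seq) > n:
--             break
--         next_seq = ""
--         for c in seq:
--             if c == "0":
--                 next_seq += "1"
--             elif c == "1":
--                 next_seq += "2"
--             else:
--                 next_seq += "0"
--         seq += next_seq
--     return int(seq[n])
-- ===== SOURCE B (Python) =====
-- def naive_get_char(n):
--     return n.bit_count() % 3
-- ===== Notes on version B (the rewrite author's own statement) =====
-- stated objective: faster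
-- what changed: Replaces the iterative doubling construction of the ternary sequence (building a string of length > n) by the closed form popcount(n) mod 3, since each doubling step appends the sequence with every digit incremented mod 3.
-- outside the precondition, e.g. on naive_get_char(-1): A returns 0, B returns 1
import Mathlib
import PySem

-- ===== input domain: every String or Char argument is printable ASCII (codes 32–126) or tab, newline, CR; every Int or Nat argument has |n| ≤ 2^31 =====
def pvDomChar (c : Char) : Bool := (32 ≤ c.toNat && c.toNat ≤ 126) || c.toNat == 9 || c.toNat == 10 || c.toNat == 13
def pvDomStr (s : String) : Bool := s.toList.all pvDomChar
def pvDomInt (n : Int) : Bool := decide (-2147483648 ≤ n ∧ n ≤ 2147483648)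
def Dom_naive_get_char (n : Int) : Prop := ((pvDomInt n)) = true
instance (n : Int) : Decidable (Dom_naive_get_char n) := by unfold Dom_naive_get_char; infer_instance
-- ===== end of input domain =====

-- B replaces A's iterative string doubling by the closed form popcount(n) mod 3 (asymptotically faster).

-- ===== PORT A =====
-- the inner `for c in seq` branch chain: '0'→'1', '1'→'2', else '0'
def pvStep (c : Char) : Char := if c = '0' then '1' else if c = '1' then '2' else '0'

-- next_seq accumulation: for c in seq: next_seq += step(c)  (built back-to-front, reversed at the end, so that += is O(1) as in CPython)
def pvNext (seq : List Char) : List Char :=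
  (seq.foldl (fun acc c => pvStep c :: acc) []).reverse

-- `for _ in range(32)` with the `if len(seq) > n: break` at the top, then seq += next_seq
def pvGrow (n : Int) : Nat → List Char → List Char
  | 0, seq => seq
  | fuel + 1, seq =>
    if (seq.length : Int) > n then seq
    else pvGrow n fuel (seq ++ pvNext seq)

def naive_get_char (n : Int) : Int :=
  let seq := pvGrow n 32 ['0']
  match PySem.List.pyGet? seq n with            -- seq[n]; none = IndexError, excluded by Pre_
  | some c => (PySem.Int.ofChars? [c]).getD 0   -- int(seq[n]); the char is always a digit here
  | none => 0

-- ===== PORT B =====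
def naive_get_char_alt (n : Int) : Int :=
  PySem.Int.mod (Int.ofNat (PySem.Int.bitCount n)) 3   -- n.bit_count() % 3

-- ===== PRECONDITION & SPEC =====
-- Pre_ excludes negative n: A raises IndexError for n ≤ -2, and at n = -1 A's value 0 comes from
-- Python's negative-index wraparound (an accident of the representation), where B returns 1.
def Pre_naive_get_char (n : Int) : Prop := 0 ≤ n
instance (n : Int) : Decidable (Pre_naive_get_char n) := by unfold Pre_naive_get_char; infer_instance
def pvWitness_naive_get_char : Int := (5)

def Spec_naive_get_char (n : Int) (out : Int) : Prop := out = naive_get_char_alt n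
instance (n : Int) (out : Int) : Decidable (Spec_naive_get_char n out) := by unfold Spec_naive_get_char; infer_instance

-- ===== CLAIM (what is proved, stated in full; the proofs are below) =====
def Claim_equal_naive_get_char : Prop := ∀ (n : Int), Dom_naive_get_char n → Pre_naive_get_char n → Spec_naive_get_char n (naive_get_char n)

-- ===== LEMMAS AND PROOFS =====

-- abstract view of A's sequence: k doublings of "0"
def pvM : Nat → List Char
  | 0 => ['0']
  | k + 1 => pvM k ++ (pvM k).map pvStep

-- the Nat popcount that PySem.Int.bitCount computes on nonnegative input
def pvPc (m : Nat) : Nat := PySem.Int.bitCount (m : Int)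

lemma pvPc_zero : pvPc 0 = 0 := by decide

lemma pvPc_succ (m : Nat) (h : 0 < m) : pvPc m = m % 2 + pvPc (m / 2) :=
  PySem.Int.bitCount_natCast h

lemma pvPc_pow_add (k j : Nat) (h : j < 2 ^ k) : pvPc (2 ^ k + j) = pvPc j + 1 := by
  induction k generalizing j with
  | zero => interval_cases j; decide
  | succ k ih =>
    have hpos : 0 < 2 ^ (k + 1) + j := by positivity
    rw [pvPc_succ _ hpos]
    have h2 : (2:Nat) ^ (k + 1) = 2 * 2 ^ k := by ring
    have hmod : (2 ^ (k + 1) + j) % 2 = j % 2 := by omega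
    have hdiv : (2 ^ (k + 1) + j) / 2 = 2 ^ k + j / 2 := by omega
    have hj2 : j / 2 < 2 ^ k := by omega
    rw [hmod, hdiv, ih _ hj2]
    by_cases hj : j = 0
    · subst hj; simp [pvPc_zero]
    · rw [pvPc_succ j (by omega)]; ring

lemma pvFoldl_cons_rev (l : List Char) (acc : List Char) :
    l.foldl (fun acc c => pvStep c :: acc) acc = (l.map pvStep).reverse ++ acc := by
  induction l generalizing acc with
  | nil => simp
  | cons x xs ih => simp [List.foldl_cons, ih]

lemma pvNext_eq_map (l : List Char) : pvNext l = l.map pvStep := by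
  unfold pvNext
  rw [pvFoldl_cons_rev]
  simp

lemma pvM_length (k : Nat) : (pvM k).length = 2 ^ k := by
  induction k with
  | zero => rfl
  | succ k ih => simp [pvM, ih]; ring

def pvDigit (r : Nat) : Char := if r = 0 then '0' else if r = 1 then '1' else '2'

lemma pvStep_digit (r : Nat) (h : r < 3) : pvStep (pvDigit r) = pvDigit ((r + 1) % 3) := by
  interval_cases r <;> decide

lemma pvM_getElem (k i : Nat) (h : i < 2 ^ k) :
    (pvM k)[i]? = some (pvDigit (pvPc i % 3)) := by
  induction k generalizing i with
  | zero => interval_cases i; decide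
  | succ k ih =>
    by_cases hi : i < 2 ^ k
    · rw [pvM, List.getElem?_append_left (by rw [pvM_length]; exact hi)]
      exact ih i hi
    · have hlen : (pvM k).length ≤ i := by rw [pvM_length]; omega
      rw [pvM, List.getElem?_append_right hlen]
      have hj : i - (pvM k).length < 2 ^ k := by rw [pvM_length]; ring_nf at h ⊢; omega
      rw [List.getElem?_map, ih _ hj]
      have hsplit : i = 2 ^ k + (i - (pvM k).length) := by rw [pvM_length]; omega
      have hpc : pvPc i % 3 = (pvPc (i - (pvM k).length) % 3 + 1) % 3 := by
        conv_lhs => rw [hsplit]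
        rw [pvPc_pow_add _ _ hj]; omega
      rw [hpc, ← pvStep_digit _ (by omega)]
      rfl

lemma pvGrow_eq (n : Int) (hn : 0 ≤ n) :
    ∀ (fuel k : Nat), n.toNat < 2 ^ (k + fuel) →
      ∃ m, pvGrow n fuel (pvM k) = pvM m ∧ n.toNat < 2 ^ m := by
  intro fuel
  induction fuel with
  | zero => intro k h; exact ⟨k, rfl, h⟩
  | succ fuel ih =>
    intro k h
    rw [pvGrow]
    by_cases hb : ((pvM k).length : Int) > n
    · rw [if_pos hb]
      refine ⟨k, rfl, ?_⟩
      rw [pvM_length] at hb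
      omega
    · rw [if_neg hb]
      have : pvM k ++ pvNext (pvM k) = pvM (k + 1) := by
        rw [pvNext_eq_map]; rfl
      rw [this]
      have harith : k + (fuel + 1) = (k + 1) + fuel := by omega
      exact ih (k + 1) (by rw [← harith]; exact h)

lemma alt_eq (n : Int) (hn : 0 ≤ n) :
    naive_get_char_alt n = ((pvPc n.toNat % 3 : Nat) : Int) := by
  have h1 : PySem.Int.bitCount n = pvPc n.toNat := by
    unfold pvPc
    congr 1
    omega
  simp [naive_get_char_alt, h1]

-- ===== VERDICT (by name: the statement is the Claim_ definition above) =====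
theorem naive_get_char_spec : Claim_equal_naive_get_char := by
  intro n hdom hpre
  unfold Spec_naive_get_char naive_get_char
  have hn : 0 ≤ n := hpre
  have hb : n ≤ 2147483648 := by
    have := of_decide_eq_true hdom
    exact this.2
  have hlt : n.toNat < 2 ^ (0 + 32) := by
    have : (2:Nat) ^ (0 + 32) = 4294967296 := by norm_num
    omega
  obtain ⟨m, hm, hmlt⟩ := pvGrow_eq n hn 32 0 hlt
  have hM0 : pvM 0 = ['0'] := rfl
  rw [← hM0, hm]
  simp only [PySem.List.pyGet?_of_nonneg _ hn, pvM_getElem m n.toNat hmlt]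
  have hr : pvPc n.toNat % 3 < 3 := Nat.mod_lt _ (by norm_num)
  rw [alt_eq n hn]
  set r := pvPc n.toNat % 3 with hrdef
  interval_cases r <;> decide
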